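-- pv_equiv track=rewrite | github.com/RonoYoker/mentis-backend | onyx_proj/onyx_proj/apps/campaign/campaign_monitoring/campaign_stats_processor.py | get_final_status_from_camp_status_list
-- ===== SOURCE A (Python) =====
-- def get_final_status_from_camp_status_list(statuses):
--     if all(x=="EXECUTED" for x in statuses):
--         return "EXECUTED"
--     if all(x in ["EXECUTED","PARTIALLY_EXECUTED"] for x in statuses):
--         return "PARTIALLY_EXECUTED"
--     if any(x in ["EXECUTED","PARTIALLY_EXECUTED"] for x in statuses):
--         return "PARTIALLY_ERROR"
--     if all(x not in ["EXECUTED","PARTIALLY_EXECUTED"] for x in statuses):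
--         return "ERROR"
-- ===== SOURCE B (Python) =====
-- def get_final_status_from_camp_status_list(statuses):
--     all_exec = True
--     any_ok = False
--     any_bad = False
--     for x in statuses:
--         if x == "EXECUTED":
--             any_ok = True
--         elif x == "PARTIALLY_EXECUTED":
--             all_exec = False
--             any_ok = True
--         else:
--             all_exec = False
--             any_bad = True
--     if all_exec:
--         return "EXECUTED"
--     if not any_bad:
--         return "PARTIALLY_EXECUTED"
--     if any_ok:
--         return "PARTIALLY_ERROR"
--     return "ERROR"
-- ===== Notes on version B (the rewrite author's own statement) =====
-- stated objective: faster
-- what changed: Replace A's four staged quantifier scans of the list by a single left-to-right pass that accumulates three flags (all_executed, any_ok, any_bad) and then decides the aggregate status from a final table.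
import Mathlib
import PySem

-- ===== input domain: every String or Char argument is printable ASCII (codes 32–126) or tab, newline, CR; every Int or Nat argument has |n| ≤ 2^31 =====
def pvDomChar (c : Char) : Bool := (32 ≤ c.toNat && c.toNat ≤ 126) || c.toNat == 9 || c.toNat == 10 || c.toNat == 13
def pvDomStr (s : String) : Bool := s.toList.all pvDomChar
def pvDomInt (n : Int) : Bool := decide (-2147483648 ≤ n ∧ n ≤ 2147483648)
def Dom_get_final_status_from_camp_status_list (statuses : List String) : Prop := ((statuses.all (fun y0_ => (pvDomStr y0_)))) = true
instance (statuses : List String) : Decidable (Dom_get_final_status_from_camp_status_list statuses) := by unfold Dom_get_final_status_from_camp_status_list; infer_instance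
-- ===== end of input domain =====

-- B is one accumulator pass over the list instead of A's four staged quantifier scans (objective: fewer passes, same O(n)).

-- ===== PORT A =====
-- Port of A: four quantifier scans in the original branch order.
-- The final 'else ""' is unreachable: branch 4's condition is the negation of branch 3's.
def get_final_status_from_camp_status_list (statuses : List String) : String :=
  if statuses.all (fun x => x == "EXECUTED") then "EXECUTED"
  else if statuses.all (fun x => x == "EXECUTED" || x == "PARTIALLY_EXECUTED") then "PARTIALLY_EXECUTED"
  else if statuses.any (fun x => x == "EXECUTED" || x == "PARTIALLY_EXECUTED") then "PARTIALLY_ERROR"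
  else if statuses.all (fun x => !(x == "EXECUTED" || x == "PARTIALLY_EXECUTED")) then "ERROR"
  else ""

-- ===== PORT B =====
-- Port of B: single left fold maintaining (all_exec, any_ok, any_bad), then a decision table.
def pvStep (acc : Bool × Bool × Bool) (x : String) : Bool × Bool × Bool :=
  if x == "EXECUTED" then (acc.1, true, acc.2.2)
  else if x == "PARTIALLY_EXECUTED" then (false, true, acc.2.2)
  else (false, acc.2.1, true)

def get_final_status_from_camp_status_list_alt (statuses : List String) : String :=
  let s := statuses.foldl pvStep (true, false, false)
  if s.1 then "EXECUTED"
  else if !s.2.2 then "PARTIALLY_EXECUTED"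
  else if s.2.1 then "PARTIALLY_ERROR"
  else "ERROR"

-- ===== PRECONDITION & SPEC =====
def Spec_get_final_status_from_camp_status_list (statuses : List String) (out : String) : Prop := out = get_final_status_from_camp_status_list_alt statuses
instance (statuses : List String) (out : String) : Decidable (Spec_get_final_status_from_camp_status_list statuses out) := by unfold Spec_get_final_status_from_camp_status_list; infer_instance

-- ===== CLAIM (what is proved, stated in full; the proofs are below) =====
def Claim_equal_get_final_status_from_camp_status_list : Prop := ∀ (statuses : List String), Dom_get_final_status_from_camp_status_list statuses → Spec_get_final_status_from_camp_status_list statuses (get_final_status_from_camp_status_list statuses)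

-- ===== LEMMAS AND PROOFS =====
-- The fold computes exactly (all EXECUTED, any ok, any bad) merged with the start accumulator.
theorem foldl_pvStep (xs : List String) (a o b : Bool) :
    xs.foldl pvStep (a, o, b) =
      (a && xs.all (fun x => x == "EXECUTED"),
       o || xs.any (fun x => x == "EXECUTED" || x == "PARTIALLY_EXECUTED"),
       b || xs.any (fun x => !(x == "EXECUTED" || x == "PARTIALLY_EXECUTED"))) := by
  induction xs generalizing a o b with
  | nil => simp
  | cons y ys ih =>
    simp only [List.foldl_cons, pvStep]
    by_cases h1 : y = "EXECUTED"
    · simp [h1, ih]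
    · have e1 : (y == "EXECUTED") = false := by simp [h1]
      by_cases h2 : y = "PARTIALLY_EXECUTED"
      · simp [h2, ih]
      · have e2 : (y == "PARTIALLY_EXECUTED") = false := by simp [h2]
        simp [e1, e2, ih]

-- ===== VERDICT (by name: the statement is the Claim_ definition above) =====
theorem get_final_status_from_camp_status_list_spec : Claim_equal_get_final_status_from_camp_status_list := by
  intro statuses _
  unfold Spec_get_final_status_from_camp_status_list
  unfold get_final_status_from_camp_status_list get_final_status_from_camp_status_list_alt
  simp only [foldl_pvStep, Bool.true_and, Bool.false_or]
  rcases hA : statuses.all (fun x => x == "EXECUTED") with _ | _ <;>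
  rcases hB : statuses.all (fun x => x == "EXECUTED" || x == "PARTIALLY_EXECUTED") with _ | _ <;>
  simp_all [List.all_eq_true, List.any_eq_true]
  · -- some bad status present: decide both if-chains
    obtain ⟨x, hx, hnx⟩ := hB
    have hall : ¬ ∀ y ∈ statuses, ¬y = "EXECUTED" → y = "PARTIALLY_EXECUTED" :=
      fun h => hnx.2 (h x hx hnx.1)
    rw [if_neg hall]
    by_cases hany : ∃ y ∈ statuses, y = "EXECUTED" ∨ y = "PARTIALLY_EXECUTED"
    · rw [if_pos hany, if_pos hany]
    · rw [if_neg hany, if_neg hany, if_pos]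
      intro y hy
      push_neg at hany
      exact hany y hy
  · -- all ok, not all EXECUTED: the hypotheses ¬ok are contradictory with hB
    intro y hy h1 h2
    rcases hB y hy with h | h <;> contradiction
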